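-- pv_equiv track=rewrite | github.com/Franna88/medwave | assign_ad_ids_improved.py | extract_utm_data
-- ===== SOURCE A (Python) =====
-- def extract_utm_data(opp):
--     """Extract all UTM data from opportunity"""
--     attributions = opp.get('attributions', [])
--
--     if not attributions:
--         return {}
--
--     # Extract UTM data from all attributions (check in reverse order)
--     # Take the first non-empty value for each field
--     utm_data = {
--         'campaign_id': '',
--         'campaign_name': '',
--         'ad_name': '',
--         'adset_name': ''
--     }
--
--     for attr in reversed(attributions):
--         if not utm_data['campaign_id']:
--             utm_data['campaign_id'] = attr.get('utmCampaignId', '').strip()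
--         if not utm_data['campaign_name']:
--             utm_data['campaign_name'] = attr.get('utmSource', '').strip()
--         if not utm_data['ad_name']:
--             utm_data['ad_name'] = attr.get('utmCampaign', '').strip()
--         if not utm_data['adset_name']:
--             utm_data['adset_name'] = attr.get('utmMedium', '').strip()
--
--     return utm_data
-- ===== SOURCE B (Python) =====
-- def extract_utm_data(opp):
--     """Extract all UTM data from opportunity"""
--     attributions = opp.get('attributions', [])
--
--     if not attributions:
--         return {}
--
--     def first_nonempty(key):
--         for attr in reversed(attributions):
--             v = attr.get(key, '').strip()
--             if v:
--                 return v
--         return ''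
--
--     fields = [
--         ('campaign_id', 'utmCampaignId'),
--         ('campaign_name', 'utmSource'),
--         ('ad_name', 'utmCampaign'),
--         ('adset_name', 'utmMedium'),
--     ]
--     return {field: first_nonempty(key) for field, key in fields}
-- ===== Notes on version B (the rewrite author's own statement) =====
-- stated objective: simpler
-- what changed: Replaces the single reverse pass that conditionally updates four dict accumulators with a per-field helper that scans reversed attributions for the first non-empty stripped value, building the result from four independent scans via a key mapping table.
import Mathlib
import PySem

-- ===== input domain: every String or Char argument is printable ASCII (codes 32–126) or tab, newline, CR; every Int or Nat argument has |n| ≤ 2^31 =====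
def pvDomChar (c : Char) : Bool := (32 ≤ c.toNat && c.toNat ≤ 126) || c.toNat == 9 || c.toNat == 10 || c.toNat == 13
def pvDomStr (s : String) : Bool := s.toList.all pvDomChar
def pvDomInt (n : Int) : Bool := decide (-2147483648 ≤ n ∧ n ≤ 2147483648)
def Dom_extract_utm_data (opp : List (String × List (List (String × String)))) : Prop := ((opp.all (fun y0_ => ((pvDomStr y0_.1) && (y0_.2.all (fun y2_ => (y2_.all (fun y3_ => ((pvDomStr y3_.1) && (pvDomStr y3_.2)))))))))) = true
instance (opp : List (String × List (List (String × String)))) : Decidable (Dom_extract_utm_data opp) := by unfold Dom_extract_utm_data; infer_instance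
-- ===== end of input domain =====

-- B replaces A's single reverse pass updating four dict accumulators by a per-field
-- helper scanning reversed attributions for the first non-empty stripped value (simpler decomposition).

-- ===== PORT A =====
-- loop body of A's 'for attr in reversed(attributions)'
def pvStepA (utm : PySem.Dict String String) (attr : List (String × String)) : PySem.Dict String String :=
  let utm := if PySem.Dict.getD utm "campaign_id" "" = "" then
      PySem.Dict.insert utm "campaign_id" (PySem.Str.strip (PySem.Dict.getD ⟨attr⟩ "utmCampaignId" "")) else utm
  let utm := if PySem.Dict.getD utm "campaign_name" "" = "" then
      PySem.Dict.insert utm "campaign_name" (PySem.Str.strip (PySem.Dict.getD ⟨attr⟩ "utmSource" "")) else utm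
  let utm := if PySem.Dict.getD utm "ad_name" "" = "" then
      PySem.Dict.insert utm "ad_name" (PySem.Str.strip (PySem.Dict.getD ⟨attr⟩ "utmCampaign" "")) else utm
  if PySem.Dict.getD utm "adset_name" "" = "" then
      PySem.Dict.insert utm "adset_name" (PySem.Str.strip (PySem.Dict.getD ⟨attr⟩ "utmMedium" "")) else utm

def extract_utm_data (opp : List (String × List (List (String × String)))) : List (String × String) :=
  let attributions := PySem.Dict.getD ⟨opp⟩ "attributions" []
  if attributions = [] then []
  else
    let utm0 : PySem.Dict String String :=
      PySem.Dict.ofList [("campaign_id", ""), ("campaign_name", ""), ("ad_name", ""), ("adset_name", "")]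
    (attributions.reverse.foldl pvStepA utm0).items

-- ===== PORT B =====
-- first attr.get(key,'').strip() that is non-empty, scanning the given list front to back
def pvFirstNE (attrs : List (List (String × String))) (key : String) : String :=
  match attrs with
  | [] => ""
  | attr :: rest =>
    let v := PySem.Str.strip (PySem.Dict.getD ⟨attr⟩ key "")
    if v ≠ "" then v else pvFirstNE rest key

def extract_utm_data_alt (opp : List (String × List (List (String × String)))) : List (String × String) :=
  let attributions := PySem.Dict.getD ⟨opp⟩ "attributions" []
  if attributions = [] then []
  else
    let fields := [("campaign_id", "utmCampaignId"), ("campaign_name", "utmSource"),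
                   ("ad_name", "utmCampaign"), ("adset_name", "utmMedium")]
    fields.map (fun fk => (fk.1, pvFirstNE attributions.reverse fk.2))

-- ===== PRECONDITION & SPEC =====
def Spec_extract_utm_data (opp : List (String × List (List (String × String)))) (out : List (String × String)) : Prop := out = extract_utm_data_alt opp
instance (opp : List (String × List (List (String × String)))) (out : List (String × String)) : Decidable (Spec_extract_utm_data opp out) := by unfold Spec_extract_utm_data; infer_instance

-- ===== CLAIM (what is proved, stated in full; the proofs are below) =====
def Claim_equal_extract_utm_data : Prop := ∀ (opp : List (String × List (List (String × String)))), Dom_extract_utm_data opp → Spec_extract_utm_data opp (extract_utm_data opp)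

-- ===== LEMMAS AND PROOFS =====

-- A's per-field accumulator: thread one field's value through the loop
def pvAcc (key : String) (a : String) : List (List (String × String)) → String
  | [] => a
  | attr :: rest => pvAcc key (if a = "" then PySem.Str.strip (PySem.Dict.getD ⟨attr⟩ key "") else a) rest

lemma pvStepA_mk (attr : List (String × String)) (a b c d : String) :
    pvStepA (PySem.Dict.mk [("campaign_id", a), ("campaign_name", b), ("ad_name", c), ("adset_name", d)]) attr
    = PySem.Dict.mk [("campaign_id", if a = "" then PySem.Str.strip (PySem.Dict.getD ⟨attr⟩ "utmCampaignId" "") else a),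
                     ("campaign_name", if b = "" then PySem.Str.strip (PySem.Dict.getD ⟨attr⟩ "utmSource" "") else b),
                     ("ad_name", if c = "" then PySem.Str.strip (PySem.Dict.getD ⟨attr⟩ "utmCampaign" "") else c),
                     ("adset_name", if d = "" then PySem.Str.strip (PySem.Dict.getD ⟨attr⟩ "utmMedium" "") else d)] := by
  by_cases h1 : a = "" <;> by_cases h2 : b = "" <;> by_cases h3 : c = "" <;> by_cases h4 : d = "" <;>
    simp [pvStepA, h1, h2, h3, h4, PySem.Dict.getD, PySem.Dict.get?, PySem.Dict.insert, PySem.Dict.contains]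

lemma foldl_pvStepA (l : List (List (String × String))) (a b c d : String) :
    (l.foldl pvStepA (PySem.Dict.mk [("campaign_id", a), ("campaign_name", b), ("ad_name", c), ("adset_name", d)])).items
    = [("campaign_id", pvAcc "utmCampaignId" a l), ("campaign_name", pvAcc "utmSource" b l),
       ("ad_name", pvAcc "utmCampaign" c l), ("adset_name", pvAcc "utmMedium" d l)] := by
  induction l generalizing a b c d with
  | nil => rfl
  | cons attr rest ih =>
    rw [List.foldl_cons, pvStepA_mk, ih]
    rfl

lemma pvAcc_of_ne (key a : String) (l : List (List (String × String))) (h : a ≠ "") :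
    pvAcc key a l = a := by
  induction l with
  | nil => rfl
  | cons attr rest ih => simp [pvAcc, h, ih]

lemma pvFirstNE_eq_pvAcc (l : List (List (String × String))) (key : String) :
    pvFirstNE l key = pvAcc key "" l := by
  induction l with
  | nil => rfl
  | cons attr rest ih =>
    simp only [pvFirstNE, pvAcc]
    by_cases h : PySem.Str.strip (PySem.Dict.getD ⟨attr⟩ key "") = ""
    · simp [h, ih]
    · simp [h, pvAcc_of_ne _ _ _ h]

-- ===== VERDICT (by name: the statement is the Claim_ definition above) =====
theorem extract_utm_data_spec : Claim_equal_extract_utm_data := by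
  intro opp _
  unfold Spec_extract_utm_data extract_utm_data extract_utm_data_alt
  by_cases h : PySem.Dict.getD (⟨opp⟩ : PySem.Dict String (List (List (String × String)))) "attributions" [] = []
  · simp [h]
  · simp only [h, List.map]
    have : (PySem.Dict.ofList [("campaign_id", ""), ("campaign_name", ""), ("ad_name", ""), ("adset_name", "")] :
        PySem.Dict String String)
        = PySem.Dict.mk [("campaign_id", ""), ("campaign_name", ""), ("ad_name", ""), ("adset_name", "")] := by decide
    rw [this, foldl_pvStepA]
    simp [pvFirstNE_eq_pvAcc]
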